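-- pv_equiv track=rewrite | github.com/EvVPEvVP/hexlet-git | Task16.py | MaximumDiscount
-- ===== SOURCE A (Python) =====
-- def MaximumDiscount(N: int, price: list) -> int:
--
--     if N < 3:
--         return 0
--
--     price = sorted(price, reverse=True)
--     price3 = []
--     result = 0
--
--     y = N // 3
--     price1 = sorted(price, reverse = False)[:y]
--     result1 = sum(price1)
--
--     for i in range(0, len(price), 3):
--         price3.append(price[i:i + 3])
--
--     for j in range(len(price3)):
--         x = min(price3[j])
--         if len(price3[j]) == 3:
--             result += x
--
--     if result >= result1:
--         return result
--     return result1
-- ===== SOURCE B (Python) =====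
-- def MaximumDiscount(N: int, price: list) -> int:
--     if N < 3:
--         return 0
--     asc = sorted(price)
--     n = len(asc)
--     y = N // 3
--     discount = 0
--     cheap = 0
--     for idx, p in enumerate(asc):
--         if idx < y:
--             cheap += p
--         if (n - idx) % 3 == 0:
--             discount += p
--     return discount if discount >= cheap else cheap
-- ===== Notes on version B (the rewrite author's own statement) =====
-- stated objective: alternative
-- what changed: Sorts once ascending (no descending sort, no triple grouping, no min()) and computes both candidate sums in a single enumerate pass with two accumulators: an element is a triple-minimum exactly when its rank from the top of the ascending order is divisible by 3, and the cheap sum takes the first N//3 positions.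
import Mathlib
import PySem

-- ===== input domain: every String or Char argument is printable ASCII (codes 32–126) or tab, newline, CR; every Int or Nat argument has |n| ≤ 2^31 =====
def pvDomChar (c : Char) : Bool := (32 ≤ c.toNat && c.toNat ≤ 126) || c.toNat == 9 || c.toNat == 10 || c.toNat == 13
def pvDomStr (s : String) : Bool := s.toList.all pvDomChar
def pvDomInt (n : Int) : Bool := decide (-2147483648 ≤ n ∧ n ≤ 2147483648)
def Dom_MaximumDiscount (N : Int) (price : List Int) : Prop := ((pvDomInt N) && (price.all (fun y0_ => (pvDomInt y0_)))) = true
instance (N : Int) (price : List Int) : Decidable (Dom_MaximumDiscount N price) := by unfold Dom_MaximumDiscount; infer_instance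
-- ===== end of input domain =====

-- B sorts once (ascending only) and computes both candidate sums in a single enumerate pass with
-- two accumulators, with no descending sort, no triple grouping and no min() (objective: alternative).

-- ===== PORT A =====
def MaximumDiscount (N : Int) (price : List Int) : Int :=
  if N < 3 then 0
  else
    let price' := PySem.List.sorted price (fun x => x) true
    let y := PySem.Int.floordiv N 3
    let price1 := PySem.List.slice (PySem.List.sorted price' (fun x => x) false) none (some y)
    let result1 := price1.sum
    let price3 := (PySem.List.pyRange 0 (price'.length : Int) 3).foldl
      (fun acc i => acc ++ [PySem.List.slice price' (some i) (some (i + 3))]) []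
    let result := (PySem.List.pyRange 0 (price3.length : Int) 1).foldl
      (fun acc j =>
        let g := PySem.List.pyGetD price3 j []
        -- x = min(price3[j]); every group is a nonempty slice, so min([]) is unreachable (the getD 0 is never used)
        let x := (PySem.List.min? g (fun v => v)).getD 0
        if g.length = 3 then acc + x else acc) 0
    if result ≥ result1 then result else result1

-- ===== PORT B =====
def MaximumDiscount_alt (N : Int) (price : List Int) : Int :=
  if N < 3 then 0
  else
    let asc := PySem.List.sorted price (fun x => x) false
    let n : Int := asc.length
    let y := PySem.Int.floordiv N 3
    let r := (PySem.List.enumerate asc 0).foldl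
      (fun (s : Int × Int) ip =>
        let cheap := if ip.1 < y then s.2 + ip.2 else s.2
        let discount := if PySem.Int.mod (n - ip.1) 3 = 0 then s.1 + ip.2 else s.1
        (discount, cheap)) (0, 0)
    if r.1 ≥ r.2 then r.1 else r.2

-- ===== PRECONDITION & SPEC =====
def Spec_MaximumDiscount (N : Int) (price : List Int) (out : Int) : Prop := out = MaximumDiscount_alt N price
instance (N : Int) (price : List Int) (out : Int) : Decidable (Spec_MaximumDiscount N price out) := by unfold Spec_MaximumDiscount; infer_instance

-- ===== CLAIM (what is proved, stated in full; the proofs are below) =====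
def Claim_equal_MaximumDiscount : Prop := ∀ (N : Int) (price : List Int), Dom_MaximumDiscount N price → Spec_MaximumDiscount N price (MaximumDiscount N price)

-- ===== LEMMAS AND PROOFS =====

-- sum of min of each complete triple (the shape of A's grouping loop)
def tripleMinSum : List Int → Int
  | a :: b :: c :: t => min (min a b) c + tripleMinSum t
  | _ => 0

-- sum of every third element (every index ≡ 2 mod 3 within the complete triples)
def thirdSum : List Int → Int
  | _ :: _ :: c :: t => c + thirdSum t
  | _ => 0

theorem lemA (l : List Int) :
    ((List.range ((l.length + 2) / 3)).map
      (fun k =>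
        let g := (l.drop (3 * k)).take 3
        if g.length = 3 then (PySem.List.min? g (fun v => v)).getD 0 else 0)).sum
      = tripleMinSum l := by
  induction l using tripleMinSum.induct with
  | case1 a b c t ih =>
    have hlen : ((a :: b :: c :: t).length + 2) / 3 = (t.length + 2) / 3 + 1 := by
      simp [List.length]; omega
    rw [hlen, List.range_succ_eq_map, List.map_cons, List.map_map, List.sum_cons]
    have hmap : ((List.range ((t.length + 2) / 3)).map
        ((fun k => (let g := ((a :: b :: c :: t).drop (3 * k)).take 3;
          if g.length = 3 then (PySem.List.min? g (fun v => v)).getD 0 else 0)) ∘ (· + 1))) =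
        (List.range ((t.length + 2) / 3)).map
          (fun k => (let g := (t.drop (3 * k)).take 3;
            if g.length = 3 then (PySem.List.min? g (fun v => v)).getD 0 else 0)) := by
      refine List.map_congr_left ?_
      intro k _
      have : 3 * (k + 1) = ((3 * k) + 1) + 1 + 1 := by omega
      simp [Function.comp, this, List.drop_succ_cons]
    rw [hmap, ih]
    have hhead : (let g := ((a :: b :: c :: t).drop (3 * 0)).take 3;
        if g.length = 3 then (PySem.List.min? g (fun v => v)).getD 0 else 0)
        = min (min a b) c := by
      simp [PySem.List.min?_id_cons]
    rw [hhead]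
    simp [tripleMinSum]
  | case2 l hne =>
    rcases l with _ | ⟨a, _ | ⟨b, _ | ⟨c, t⟩⟩⟩
    · simp [tripleMinSum]
    · simp [List.range_succ, tripleMinSum]
    · simp [List.range_succ, tripleMinSum]
    · exact (hne a b c t rfl).elim

theorem lemC (l : List Int) (h : l.Pairwise (fun a b => b ≤ a)) :
    tripleMinSum l = thirdSum l := by
  induction l using thirdSum.induct with
  | case1 a b c t ih =>
    simp only [tripleMinSum, thirdSum]
    rcases List.pairwise_cons.1 h with ⟨ha, h2⟩
    rcases List.pairwise_cons.1 h2 with ⟨hb, h3⟩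
    rcases List.pairwise_cons.1 h3 with ⟨hc, h4⟩
    have hca := ha c (by simp)
    have hcb := hb c (by simp)
    rw [ih h4]
    omega
  | case2 l hne =>
    rcases l with _ | ⟨a, _ | ⟨b, _ | ⟨c, t⟩⟩⟩
    · rfl
    · rfl
    · rfl
    · exact (hne a b c t rfl).elim

-- appending one element to the end adds it iff it completes a triple
theorem thirdSum_append_singleton (xs : List Int) (a : Int) :
    thirdSum (xs ++ [a]) = thirdSum xs + (if xs.length % 3 = 2 then a else 0) := by
  induction xs using thirdSum.induct with
  | case1 x b c t ih =>
    simp only [List.cons_append, thirdSum, ih]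
    have : (x :: b :: c :: t).length % 3 = t.length % 3 := by simp [List.length]; omega
    rw [this]; ring
  | case2 l hne =>
    rcases l with _ | ⟨x, _ | ⟨y, _ | ⟨z, t⟩⟩⟩
    · simp [thirdSum]
    · simp [thirdSum]
    · simp [thirdSum]
    · exact (hne x y z t rfl).elim

-- a pair-foldl with independent additive components splits into two sums
theorem foldl_pair_add {α : Type} (F G : α → Int) :
    ∀ (l : List α) (a b : Int),
      l.foldl (fun s x => (s.1 + F x, s.2 + G x)) (a, b)
        = (a + (l.map F).sum, b + (l.map G).sum) := by
  intro l
  induction l with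
  | nil => intro a b; simp
  | cons x t ih => intro a b; simp [List.foldl_cons, ih]; constructor <;> ring

-- the "rank from the top divisible by 3" sum over an enumeration is thirdSum of the reverse
theorem enum_third (l : List Int) :
    ∀ (k m : Int), m = k + l.length →
      ((PySem.List.enumerate l k).map
        (fun ip => if PySem.Int.mod (m - ip.1) 3 = 0 then ip.2 else 0)).sum
        = thirdSum l.reverse := by
  induction l with
  | nil => intro k m _; simp [PySem.List.enumerate_nil, thirdSum]
  | cons a t ih =>
    intro k m hm
    rw [PySem.List.enumerate_cons, List.map_cons, List.sum_cons,
      ih (k + 1) m (by simp only [List.length_cons] at hm; push_cast at hm ⊢; omega)]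
    have hrev : thirdSum ((a :: t).reverse) = thirdSum t.reverse + (if t.length % 3 = 2 then a else 0) := by
      rw [List.reverse_cons, thirdSum_append_singleton, List.length_reverse]
    rw [hrev]
    have hmk : m - k = ((t.length + 1 : Nat) : Int) := by
      simp only [List.length_cons] at hm; push_cast at hm ⊢; omega
    have hcond : (PySem.Int.mod (m - k) 3 = 0) ↔ (t.length % 3 = 2) := by
      rw [hmk, PySem.Int.mod_eq_emod_of_pos (by norm_num : (0:Int) < 3)]
      omega
    by_cases h : t.length % 3 = 2
    · rw [if_pos (hcond.2 h), if_pos h]; ring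
    · rw [if_neg (fun hc => h (hcond.1 hc)), if_neg h]; ring

-- the "index below y" sum over an enumeration is the sum of a prefix
theorem enum_take (l : List Int) :
    ∀ (k y : Int),
      ((PySem.List.enumerate l k).map (fun ip => if ip.1 < y then ip.2 else 0)).sum
        = (l.take (y - k).toNat).sum := by
  induction l with
  | nil => simp [PySem.List.enumerate_nil]
  | cons a t ih =>
    intro k y
    rw [PySem.List.enumerate_cons, List.map_cons, List.sum_cons, ih (k + 1) y]
    by_cases h : k < y
    · have h1 : (y - k).toNat = (y - (k + 1)).toNat + 1 := by omega
      rw [if_pos h, h1, List.take_succ_cons, List.sum_cons]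
    · have h1 : (y - k).toNat = 0 := by omega
      have h2 : (y - (k + 1)).toNat = 0 := by omega
      rw [if_neg h, h1, h2]
      simp

theorem main_eq (N : Int) (price : List Int) :
    MaximumDiscount N price = MaximumDiscount_alt N price := by
  by_cases hN : N < 3
  · simp [MaximumDiscount, MaximumDiscount_alt, hN]
  · simp only [MaximumDiscount, MaximumDiscount_alt, if_neg hN]
    set desc := PySem.List.sorted price (fun x => x) true with hdesc
    set asc := PySem.List.sorted price (fun x => x) false with hasc
    set y := PySem.Int.floordiv N 3 with hy
    have hy0 : 0 ≤ y := by
      rw [hy]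
      have := PySem.Int.floordiv_eq_iff_of_pos (a := N) (b := 3) (q := PySem.Int.floordiv N 3)
        (by omega)
      omega
    -- A's result1 is the sum of the first y elements of the ascending sort
    have hres1 : PySem.List.sorted desc (fun x => x) false = asc :=
      PySem.List.sorted_eq_sorted_of_perm desc price (fun x => x)
        (fun _ _ h => h) (PySem.List.sorted_perm price (fun x => x) true)
    rw [hres1, PySem.List.slice_to (xs := asc) (b := y) hy0]
    -- A's result is tripleMinSum desc = thirdSum desc
    rw [PySem.List.foldl_append_singleton_eq_map
      (fun i => PySem.List.slice desc (some i) (some (i + 3)))]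
    simp only [List.nil_append]
    rw [PySem.List.foldl_pyRange_zero_pyGetD'
      ((PySem.List.pyRange 0 (desc.length : Int) 3).map
        (fun i => PySem.List.slice desc (some i) (some (i + 3)))) []
      (fun acc g => if g.length = 3 then acc + (PySem.List.min? g (fun v => v)).getD 0 else acc) 0]
    have hbody : (fun (acc : Int) (g : List Int) =>
        if g.length = 3 then acc + (PySem.List.min? g (fun v => v)).getD 0 else acc)
        = fun acc g => acc + (if g.length = 3 then (PySem.List.min? g (fun v => v)).getD 0 else 0) := by
      funext acc g; split <;> simp
    rw [hbody, PySem.List.foldl_add, List.map_map]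
    have h3 : (0:Int) < 3 := by norm_num
    rw [PySem.List.pyRange_of_pos 0 (desc.length : Int) h3]
    have hcntA : (if (0:Int) < (desc.length : Int)
        then (((desc.length : Int) - 0 + 3 - 1) / 3).toNat else 0) = (desc.length + 2) / 3 := by
      split <;> omega
    rw [hcntA, List.map_map]
    have hmapA : (List.range ((desc.length + 2) / 3)).map
        (((fun g => if (List.length g) = 3 then (PySem.List.min? g (fun v => v)).getD 0 else 0) ∘
          (fun i => PySem.List.slice desc (some i) (some (i + 3)))) ∘ (fun k : Nat => 0 + 3 * (k:Int)))
        = (List.range ((desc.length + 2) / 3)).map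
          (fun k =>
            let g := (desc.drop (3 * k)).take 3
            if g.length = 3 then (PySem.List.min? g (fun v => v)).getD 0 else 0) := by
      refine List.map_congr_left ?_
      intro k _
      simp only [Function.comp]
      rw [PySem.List.slice_toNat (xs := desc) (a := 0 + 3 * (k:Int)) (b := 0 + 3 * (k:Int) + 3)
        (by positivity) (by positivity)]
      have e1 : (0 + 3 * (k:Int)).toNat = 3 * k := by omega
      rw [e1]
      have e2 : (0 + 3 * (k:Int) + 3).toNat - 3 * k = 3 := by omega
      rw [e2]
    rw [hmapA, lemA desc, lemC desc (PySem.List.sorted_pairwise_rev price (fun x => x))]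
    -- B's fold splits into the two sums
    have hsplit : (PySem.List.enumerate asc 0).foldl
        (fun (s : Int × Int) ip =>
          let cheap := if ip.1 < y then s.2 + ip.2 else s.2
          let discount := if PySem.Int.mod ((asc.length : Int) - ip.1) 3 = 0 then s.1 + ip.2 else s.1
          (discount, cheap)) (0, 0)
        = (((PySem.List.enumerate asc 0).map
              (fun ip => if PySem.Int.mod ((asc.length : Int) - ip.1) 3 = 0 then ip.2 else 0)).sum,
           ((PySem.List.enumerate asc 0).map (fun ip => if ip.1 < y then ip.2 else 0)).sum) := by
      have hb : (fun (s : Int × Int) (ip : Int × Int) =>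
          let cheap := if ip.1 < y then s.2 + ip.2 else s.2
          let discount := if PySem.Int.mod ((asc.length : Int) - ip.1) 3 = 0 then s.1 + ip.2 else s.1
          (discount, cheap))
          = fun s ip => (s.1 + (if PySem.Int.mod ((asc.length : Int) - ip.1) 3 = 0 then ip.2 else 0),
                         s.2 + (if ip.1 < y then ip.2 else 0)) := by
        funext s ip
        simp only []
        split <;> split <;> simp
      rw [hb, foldl_pair_add]
      simp
    rw [hsplit]
    simp only []
    rw [enum_third asc 0 (asc.length : Int) (by simp), enum_take asc 0 y]
    -- the descending sort is the reverse of the ascending sort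
    have hda : desc = asc.reverse := by
      haveI : Std.Antisymm (fun a b : Int => b ≤ a) := ⟨fun a b h1 h2 => le_antisymm h2 h1⟩
      refine List.Perm.eq_of_pairwise' (r := fun a b : Int => b ≤ a)
        (PySem.List.sorted_pairwise_rev price (fun x => x))
        (by rw [List.pairwise_reverse]; exact PySem.List.sorted_pairwise price (fun x => x))
        ((PySem.List.sorted_perm price (fun x => x) true).trans
          ((PySem.List.sorted_perm price (fun x => x) false).symm.trans
            (List.reverse_perm asc).symm))
    rw [hda]
    have hyk : y - 0 = y := by ring
    rw [hyk]
    simp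

-- ===== VERDICT (by name: the statement is the Claim_ definition above) =====
theorem MaximumDiscount_spec : Claim_equal_MaximumDiscount := by
  intro N price _
  exact main_eq N price
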